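-- pv_equiv track=rewrite | github.com/2537-2920/SeeMusic | backend/core/score/key_detection.py | build_key_signature_step_map
-- ===== SOURCE A (Python) =====
-- SHARP_ORDER = ("F", "C", "G", "D", "A", "E", "B")
--
-- FLAT_ORDER = ("B", "E", "A", "D", "G", "C", "F")
--
-- MAJOR_KEY_TO_FIFTHS = {
--     "Cb": -7,
--     "Gb": -6,
--     "Db": -5,
--     "Ab": -4,
--     "Eb": -3,
--     "Bb": -2,
--     "F": -1,
--     "C": 0,
--     "G": 1,
--     "D": 2,
--     "A": 3,
--     "E": 4,
--     "B": 5,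
--     "F#": 6,
--     "C#": 7,
-- }
--
-- MINOR_KEY_TO_FIFTHS = {
--     "Abm": -7,
--     "Ebm": -6,
--     "Bbm": -5,
--     "Fm": -4,
--     "Cm": -3,
--     "Gm": -2,
--     "Dm": -1,
--     "Am": 0,
--     "Em": 1,
--     "Bm": 2,
--     "F#m": 3,
--     "C#m": 4,
--     "G#m": 5,
--     "D#m": 6,
--     "A#m": 7,
-- }
--
-- CANONICAL_MAJOR_KEY_BY_TOKEN = {key.upper(): key for key in MAJOR_KEY_TO_FIFTHS}
--
-- CANONICAL_MINOR_KEY_BY_TOKEN = {key.upper(): key for key in MINOR_KEY_TO_FIFTHS}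
--
-- def normalize_key_signature_text(value: str | None, default: str = "C") -> str:
--     fallback = default if default.endswith("m") else CANONICAL_MAJOR_KEY_BY_TOKEN.get(default.upper(), "C")
--     if not value:
--         return fallback
--     compact = str(value).strip().replace(" ", "")
--     if not compact:
--         return fallback
--     upper = compact.upper()
--     if upper.endswith("M") and len(compact) > 1 and compact[-1].islower():
--         return CANONICAL_MINOR_KEY_BY_TOKEN.get(upper, fallback)
--     return CANONICAL_MAJOR_KEY_BY_TOKEN.get(upper, fallback)
--
-- def key_signature_to_fifths_and_mode(value: str | None) -> tuple[int, str]: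
--     canonical = normalize_key_signature_text(value)
--     if canonical.endswith("m"):
--         return int(MINOR_KEY_TO_FIFTHS.get(canonical, 0)), "minor"
--     return int(MAJOR_KEY_TO_FIFTHS.get(canonical, 0)), "major"
--
-- def build_key_signature_step_map(key_signature: str | None) -> dict[str, int]:
--     fifths, _ = key_signature_to_fifths_and_mode(key_signature)
--     accidentals = {step: 0 for step in "ABCDEFG"}
--     if fifths > 0:
--         for step in SHARP_ORDER[:fifths]:
--             accidentals[step] = 1
--     elif fifths < 0:
--         for step in FLAT_ORDER[: abs(fifths)]:
--             accidentals[step] = -1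
--     return accidentals
-- ===== SOURCE B (Python) =====
-- # B: skip the canonical-key roundtrip entirely: one merged token->fifths table per mode,
-- # then derive each step's accidental from its position on the single line of fifths "FCGDAEB".
--
-- TOKEN_TO_FIFTHS_MAJOR = {
--     "CB": -7, "GB": -6, "DB": -5, "AB": -4, "EB": -3, "BB": -2, "F": -1,
--     "C": 0, "G": 1, "D": 2, "A": 3, "E": 4, "B": 5, "F#": 6, "C#": 7,
-- }
--
-- TOKEN_TO_FIFTHS_MINOR = {
--     "ABM": -7, "EBM": -6, "BBM": -5, "FM": -4, "CM": -3, "GM": -2, "DM": -1,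
--     "AM": 0, "EM": 1, "BM": 2, "F#M": 3, "C#M": 4, "G#M": 5, "D#M": 6, "A#M": 7,
-- }
--
-- LINE_OF_FIFTHS = ("F", "C", "G", "D", "A", "E", "B")
--
--
-- def _fifths(value):
--     if not value:
--         return 0
--     compact = str(value).strip().replace(" ", "")
--     if not compact:
--         return 0
--     upper = compact.upper()
--     if upper.endswith("M") and len(compact) > 1 and compact[-1].islower():
--         return TOKEN_TO_FIFTHS_MINOR.get(upper, 0)
--     return TOKEN_TO_FIFTHS_MAJOR.get(upper, 0)
--
--
-- def build_key_signature_step_map(key_signature):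
--     fifths = _fifths(key_signature)
--     return {
--         step: 1 if LINE_OF_FIFTHS.index(step) < fifths
--         else (-1 if LINE_OF_FIFTHS.index(step) >= 7 + fifths else 0)
--         for step in "ABCDEFG"
--     }
-- ===== Notes on version B (the rewrite author's own statement) =====
-- stated objective: idiomatic
-- what changed: A resolves the token to a canonical key name and then looks that up in a second fifths dict, and builds the result by zero-initialising a dict and overwriting a prefix of SHARP_ORDER or FLAT_ORDER in a sign-branched loop; B uses one merged token->fifths table per mode (no canonical-name roundtrip) and one comprehension deciding each step's accidental from its position on the single line of fifths FCGDAEB.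
import Mathlib
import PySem

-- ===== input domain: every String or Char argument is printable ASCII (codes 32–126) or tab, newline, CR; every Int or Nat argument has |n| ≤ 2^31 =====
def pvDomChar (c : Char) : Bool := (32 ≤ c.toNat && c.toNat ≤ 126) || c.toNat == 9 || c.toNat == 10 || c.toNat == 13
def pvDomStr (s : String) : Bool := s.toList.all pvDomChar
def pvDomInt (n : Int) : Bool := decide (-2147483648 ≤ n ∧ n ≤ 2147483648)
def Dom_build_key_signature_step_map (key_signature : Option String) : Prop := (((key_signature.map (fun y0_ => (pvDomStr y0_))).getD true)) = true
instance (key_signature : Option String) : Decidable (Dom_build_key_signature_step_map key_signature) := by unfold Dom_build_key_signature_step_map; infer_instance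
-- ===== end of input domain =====

-- B drops A's canonical-key roundtrip (token -> canonical name -> fifths dict) in favour of one merged
-- token->fifths table per mode, and replaces A's zero-init dict + sign-branched prefix-overwrite loops by a
-- comprehension deciding each step's accidental from its position on the single line of fifths (objective: idiomatic).

-- ===== PORT A =====
def SHARP_ORDER : List String := ["F", "C", "G", "D", "A", "E", "B"]
def FLAT_ORDER : List String := ["B", "E", "A", "D", "G", "C", "F"]
def MAJOR_KEY_TO_FIFTHS : PySem.Dict String Int :=
  PySem.Dict.ofList [("Cb", -7), ("Gb", -6), ("Db", -5), ("Ab", -4), ("Eb", -3), ("Bb", -2),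
    ("F", -1), ("C", 0), ("G", 1), ("D", 2), ("A", 3), ("E", 4), ("B", 5), ("F#", 6), ("C#", 7)]
def MINOR_KEY_TO_FIFTHS : PySem.Dict String Int :=
  PySem.Dict.ofList [("Abm", -7), ("Ebm", -6), ("Bbm", -5), ("Fm", -4), ("Cm", -3), ("Gm", -2),
    ("Dm", -1), ("Am", 0), ("Em", 1), ("Bm", 2), ("F#m", 3), ("C#m", 4), ("G#m", 5), ("D#m", 6), ("A#m", 7)]
def CANONICAL_MAJOR_KEY_BY_TOKEN : PySem.Dict String String :=
  PySem.Dict.ofList (MAJOR_KEY_TO_FIFTHS.keys.map (fun k => (PySem.Str.upper k, k)))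
def CANONICAL_MINOR_KEY_BY_TOKEN : PySem.Dict String String :=
  PySem.Dict.ofList (MINOR_KEY_TO_FIFTHS.keys.map (fun k => (PySem.Str.upper k, k)))

def normalize_key_signature_text (value : Option String) (dflt : String) : String :=
  let fallback := if PySem.Str.endswith dflt "m" then dflt
                  else CANONICAL_MAJOR_KEY_BY_TOKEN.getD (PySem.Str.upper dflt) "C"
  match value with
  | none => fallback
  | some v =>
    if v = "" then fallback else
    let compact := PySem.Str.replace (PySem.Str.strip v) " " ""
    if compact = "" then fallback else
    let upper := PySem.Str.upper compact
    -- compact[-1] cannot raise here: the branch requires len(compact) > 1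
    if PySem.Str.endswith upper "M" && decide (1 < PySem.Str.len compact) &&
       ((PySem.List.pyGet? compact.toList (-1)).map PySem.Chars.islower).getD false
    then CANONICAL_MINOR_KEY_BY_TOKEN.getD upper fallback
    else CANONICAL_MAJOR_KEY_BY_TOKEN.getD upper fallback

def key_signature_to_fifths_and_mode (value : Option String) : Int × String :=
  let canonical := normalize_key_signature_text value "C"
  if PySem.Str.endswith canonical "m" then (MINOR_KEY_TO_FIFTHS.getD canonical 0, "minor")
  else (MAJOR_KEY_TO_FIFTHS.getD canonical 0, "major")

def pvSteps : List String := ["A", "B", "C", "D", "E", "F", "G"]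

-- body of A after 'fifths, _ = …': zero-init dict, then overwrite a prefix of SHARP_ORDER/FLAT_ORDER
def pvStepMapA (fifths : Int) : List (String × Int) :=
  let accidentals := pvSteps.foldl (fun d s => d.insert s 0) (PySem.Dict.empty : PySem.Dict String Int)
  if fifths > 0 then
    ((PySem.List.slice SHARP_ORDER none (some fifths)).foldl (fun d s => d.insert s 1) accidentals).items
  else if fifths < 0 then
    ((PySem.List.slice FLAT_ORDER none (some |fifths|)).foldl (fun d s => d.insert s (-1)) accidentals).items
  else accidentals.items

def build_key_signature_step_map (key_signature : Option String) : List (String × Int) :=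
  pvStepMapA (key_signature_to_fifths_and_mode key_signature).1

-- ===== PORT B =====
def TOKEN_TO_FIFTHS_MAJOR : PySem.Dict String Int :=
  PySem.Dict.ofList [("CB", -7), ("GB", -6), ("DB", -5), ("AB", -4), ("EB", -3), ("BB", -2),
    ("F", -1), ("C", 0), ("G", 1), ("D", 2), ("A", 3), ("E", 4), ("B", 5), ("F#", 6), ("C#", 7)]
def TOKEN_TO_FIFTHS_MINOR : PySem.Dict String Int :=
  PySem.Dict.ofList [("ABM", -7), ("EBM", -6), ("BBM", -5), ("FM", -4), ("CM", -3), ("GM", -2),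
    ("DM", -1), ("AM", 0), ("EM", 1), ("BM", 2), ("F#M", 3), ("C#M", 4), ("G#M", 5), ("D#M", 6), ("A#M", 7)]
def LINE_OF_FIFTHS : List String := ["F", "C", "G", "D", "A", "E", "B"]

def pvFifthsB (value : Option String) : Int :=
  match value with
  | none => 0
  | some v =>
    if v = "" then 0 else
    let compact := PySem.Str.replace (PySem.Str.strip v) " " ""
    if compact = "" then 0 else
    let upper := PySem.Str.upper compact
    -- compact[-1] cannot raise here: the branch requires len(compact) > 1
    if PySem.Str.endswith upper "M" && decide (1 < PySem.Str.len compact) &&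
       ((PySem.List.pyGet? compact.toList (-1)).map PySem.Chars.islower).getD false
    then TOKEN_TO_FIFTHS_MINOR.getD upper 0
    else TOKEN_TO_FIFTHS_MAJOR.getD upper 0

-- body of B: one dict comprehension over the steps; LINE_OF_FIFTHS.index never raises (every step occurs)
def pvStepMapB (fifths : Int) : List (String × Int) :=
  (PySem.Dict.ofList (pvSteps.map (fun step =>
    (step, if ((PySem.List.index? LINE_OF_FIFTHS step).getD 0 : Int) < fifths then (1 : Int)
           else if ((PySem.List.index? LINE_OF_FIFTHS step).getD 0 : Int) ≥ 7 + fifths then -1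
           else 0)))).items

def build_key_signature_step_map_alt (key_signature : Option String) : List (String × Int) :=
  pvStepMapB (pvFifthsB key_signature)

-- ===== PRECONDITION & SPEC =====
def Spec_build_key_signature_step_map (key_signature : Option String) (out : List (String × Int)) : Prop := out = build_key_signature_step_map_alt key_signature
instance (key_signature : Option String) (out : List (String × Int)) : Decidable (Spec_build_key_signature_step_map key_signature out) := by unfold Spec_build_key_signature_step_map; infer_instance

-- ===== CLAIM (what is proved, stated in full; the proofs are below) =====
def Claim_equal_build_key_signature_step_map : Prop := ∀ (key_signature : Option String), Dom_build_key_signature_step_map key_signature → Spec_build_key_signature_step_map key_signature (build_key_signature_step_map key_signature)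

-- ===== LEMMAS AND PROOFS =====

theorem minor_lookup (u : String) :
    (if PySem.Str.endswith (CANONICAL_MINOR_KEY_BY_TOKEN.getD u "C") "m"
     then (MINOR_KEY_TO_FIFTHS.getD (CANONICAL_MINOR_KEY_BY_TOKEN.getD u "C") 0, "minor")
     else (MAJOR_KEY_TO_FIFTHS.getD (CANONICAL_MINOR_KEY_BY_TOKEN.getD u "C") 0, "major")).1
    = TOKEN_TO_FIFTHS_MINOR.getD u 0 := by
  rcases eq_or_ne u "ABM" with rfl|h1; · decide
  rcases eq_or_ne u "EBM" with rfl|h2; · decide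
  rcases eq_or_ne u "BBM" with rfl|h3; · decide
  rcases eq_or_ne u "FM" with rfl|h4; · decide
  rcases eq_or_ne u "CM" with rfl|h5; · decide
  rcases eq_or_ne u "GM" with rfl|h6; · decide
  rcases eq_or_ne u "DM" with rfl|h7; · decide
  rcases eq_or_ne u "AM" with rfl|h8; · decide
  rcases eq_or_ne u "EM" with rfl|h9; · decide
  rcases eq_or_ne u "BM" with rfl|h10; · decide
  rcases eq_or_ne u "F#M" with rfl|h11; · decide
  rcases eq_or_ne u "C#M" with rfl|h12; · decide
  rcases eq_or_ne u "G#M" with rfl|h13; · decide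
  rcases eq_or_ne u "D#M" with rfl|h14; · decide
  rcases eq_or_ne u "A#M" with rfl|h15; · decide
  have hc : CANONICAL_MINOR_KEY_BY_TOKEN = PySem.Dict.mk [("ABM","Abm"),("EBM","Ebm"),("BBM","Bbm"),("FM","Fm"),("CM","Cm"),("GM","Gm"),("DM","Dm"),("AM","Am"),("EM","Em"),("BM","Bm"),("F#M","F#m"),("C#M","C#m"),("G#M","G#m"),("D#M","D#m"),("A#M","A#m")] := by decide
  have ht : TOKEN_TO_FIFTHS_MINOR = PySem.Dict.mk [("ABM",-7),("EBM",-6),("BBM",-5),("FM",-4),("CM",-3),("GM",-2),("DM",-1),("AM",0),("EM",1),("BM",2),("F#M",3),("C#M",4),("G#M",5),("D#M",6),("A#M",7)] := by decide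
  rw [hc, ht]
  simp only [PySem.Dict.getD_eq_get?_getD, PySem.Dict.get?_mk_cons,
    beq_iff_eq, if_neg (Ne.symm h1), if_neg (Ne.symm h2), if_neg (Ne.symm h3), if_neg (Ne.symm h4),
    if_neg (Ne.symm h5), if_neg (Ne.symm h6), if_neg (Ne.symm h7), if_neg (Ne.symm h8),
    if_neg (Ne.symm h9), if_neg (Ne.symm h10), if_neg (Ne.symm h11), if_neg (Ne.symm h12),
    if_neg (Ne.symm h13), if_neg (Ne.symm h14), if_neg (Ne.symm h15)]
  rw [show ∀ x, (PySem.Dict.mk ([] : List (String×String))).get? x = none from fun _ => rfl,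
      show ∀ x, (PySem.Dict.mk ([] : List (String×Int))).get? x = none from fun _ => rfl]
  decide

theorem major_lookup (u : String) :
    (if PySem.Str.endswith (CANONICAL_MAJOR_KEY_BY_TOKEN.getD u "C") "m"
     then (MINOR_KEY_TO_FIFTHS.getD (CANONICAL_MAJOR_KEY_BY_TOKEN.getD u "C") 0, "minor")
     else (MAJOR_KEY_TO_FIFTHS.getD (CANONICAL_MAJOR_KEY_BY_TOKEN.getD u "C") 0, "major")).1
    = TOKEN_TO_FIFTHS_MAJOR.getD u 0 := by
  rcases eq_or_ne u "CB" with rfl|h1; · decide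
  rcases eq_or_ne u "GB" with rfl|h2; · decide
  rcases eq_or_ne u "DB" with rfl|h3; · decide
  rcases eq_or_ne u "AB" with rfl|h4; · decide
  rcases eq_or_ne u "EB" with rfl|h5; · decide
  rcases eq_or_ne u "BB" with rfl|h6; · decide
  rcases eq_or_ne u "F" with rfl|h7; · decide
  rcases eq_or_ne u "C" with rfl|h8; · decide
  rcases eq_or_ne u "G" with rfl|h9; · decide
  rcases eq_or_ne u "D" with rfl|h10; · decide
  rcases eq_or_ne u "A" with rfl|h11; · decide
  rcases eq_or_ne u "E" with rfl|h12; · decide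
  rcases eq_or_ne u "B" with rfl|h13; · decide
  rcases eq_or_ne u "F#" with rfl|h14; · decide
  rcases eq_or_ne u "C#" with rfl|h15; · decide
  have hc : CANONICAL_MAJOR_KEY_BY_TOKEN = PySem.Dict.mk [("CB","Cb"),("GB","Gb"),("DB","Db"),("AB","Ab"),("EB","Eb"),("BB","Bb"),("F","F"),("C","C"),("G","G"),("D","D"),("A","A"),("E","E"),("B","B"),("F#","F#"),("C#","C#")] := by decide
  have ht : TOKEN_TO_FIFTHS_MAJOR = PySem.Dict.mk [("CB",-7),("GB",-6),("DB",-5),("AB",-4),("EB",-3),("BB",-2),("F",-1),("C",0),("G",1),("D",2),("A",3),("E",4),("B",5),("F#",6),("C#",7)] := by decide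
  rw [hc, ht]
  simp only [PySem.Dict.getD_eq_get?_getD, PySem.Dict.get?_mk_cons,
    beq_iff_eq, if_neg (Ne.symm h1), if_neg (Ne.symm h2), if_neg (Ne.symm h3), if_neg (Ne.symm h4),
    if_neg (Ne.symm h5), if_neg (Ne.symm h6), if_neg (Ne.symm h7), if_neg (Ne.symm h8),
    if_neg (Ne.symm h9), if_neg (Ne.symm h10), if_neg (Ne.symm h11), if_neg (Ne.symm h12),
    if_neg (Ne.symm h13), if_neg (Ne.symm h14), if_neg (Ne.symm h15)]
  rw [show ∀ x, (PySem.Dict.mk ([] : List (String×String))).get? x = none from fun _ => rfl,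
      show ∀ x, (PySem.Dict.mk ([] : List (String×Int))).get? x = none from fun _ => rfl]
  decide


theorem fifths_eq (ks : Option String) :
    (key_signature_to_fifths_and_mode ks).1 = pvFifthsB ks := by
  cases ks with
  | none => decide
  | some v =>
    by_cases hv : v = ""
    · subst hv; decide
    · simp only [key_signature_to_fifths_and_mode, normalize_key_signature_text, pvFifthsB,
        if_neg hv]
      by_cases hc : PySem.Str.replace (PySem.Str.strip v) " " "" = ""
      · simp only [hc]
        decide
      · simp only [hc]
        rw [show (if PySem.Str.endswith "C" "m" = true then "C"
                  else CANONICAL_MAJOR_KEY_BY_TOKEN.getD (PySem.Str.upper "C") "C") = "C" from by decide]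
        simp only [if_false]
        by_cases hm : (PySem.Str.endswith (PySem.Str.upper (PySem.Str.replace (PySem.Str.strip v) " " "")) "M" &&
              decide (1 < PySem.Str.len (PySem.Str.replace (PySem.Str.strip v) " " "")) &&
            (Option.map PySem.Chars.islower (PySem.List.pyGet? (PySem.Str.replace (PySem.Str.strip v) " " "").toList (-1))).getD false) = true
        · simp only [hm, if_true]
          exact minor_lookup (PySem.Str.upper (PySem.Str.replace (PySem.Str.strip v) " " ""))
        · simp only [hm, Bool.false_eq_true, if_false]
          exact major_lookup (PySem.Str.upper (PySem.Str.replace (PySem.Str.strip v) " " ""))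

theorem getD_minor_bounds (u : String) :
    -7 ≤ TOKEN_TO_FIFTHS_MINOR.getD u 0 ∧ TOKEN_TO_FIFTHS_MINOR.getD u 0 ≤ 7 := by
  rw [PySem.Dict.getD_eq_get?_getD]
  cases hg : TOKEN_TO_FIFTHS_MINOR.get? u with
  | none => simp
  | some w =>
    have hm := PySem.Dict.mem_items_of_get?_eq_some _ hg
    have hv := List.mem_map_of_mem (f := Prod.snd) hm
    rw [show TOKEN_TO_FIFTHS_MINOR.items.map Prod.snd =
        [-7, -6, -5, -4, -3, -2, -1, 0, 1, 2, 3, 4, 5, 6, 7] from rfl] at hv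
    fin_cases hv <;> simp

theorem getD_major_bounds (u : String) :
    -7 ≤ TOKEN_TO_FIFTHS_MAJOR.getD u 0 ∧ TOKEN_TO_FIFTHS_MAJOR.getD u 0 ≤ 7 := by
  rw [PySem.Dict.getD_eq_get?_getD]
  cases hg : TOKEN_TO_FIFTHS_MAJOR.get? u with
  | none => simp
  | some w =>
    have hm := PySem.Dict.mem_items_of_get?_eq_some _ hg
    have hv := List.mem_map_of_mem (f := Prod.snd) hm
    rw [show TOKEN_TO_FIFTHS_MAJOR.items.map Prod.snd =
        [-7, -6, -5, -4, -3, -2, -1, 0, 1, 2, 3, 4, 5, 6, 7] from rfl] at hv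
    fin_cases hv <;> simp

theorem fifthsB_bounds (ks : Option String) :
    -7 ≤ pvFifthsB ks ∧ pvFifthsB ks ≤ 7 := by
  cases ks with
  | none => simp [pvFifthsB]
  | some v =>
    simp only [pvFifthsB]
    split_ifs
    · omega
    · omega
    · exact getD_minor_bounds _
    · exact getD_major_bounds _

set_option maxHeartbeats 2000000 in
theorem stepMap_eq (f : Int) (h1 : -7 ≤ f) (h2 : f ≤ 7) : pvStepMapA f = pvStepMapB f := by
  interval_cases f <;> decide

-- ===== VERDICT (by name: the statement is the Claim_ definition above) =====
theorem build_key_signature_step_map_spec : Claim_equal_build_key_signature_step_map := by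
  intro ks _
  show pvStepMapA _ = pvStepMapB _
  rw [fifths_eq]
  obtain ⟨h1, h2⟩ := fifthsB_bounds ks
  exact stepMap_eq _ h1 h2
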